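-- pv_equiv track=rewrite | github.com/pypi-data/pypi-mirror-401 | packages/specimux/specimux-0.7.0.tar.gz/specimux-0.7.0/src/specimux/alignment.py | color_sequence
-- ===== SOURCE A (Python) =====
-- from typing import List, Optional, Tuple, Union
--
-- def color_sequence(seq: str, quality_scores: List[int], p1_location: Tuple[int, int],
--                    p2_location: Tuple[int, int], b1_location: Tuple[int, int], b2_location: Tuple[int, int]):
--     blue = "\033[0;34m"
--     green = "\033[0;32m"
--     red = "\033[0;31m"
--     color_reset = "\033[0m"  # No Color (reset)
--
--     seq_len = len(seq)
--     colored_seq = [''] * seq_len  # Initialize a list to hold colored characters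
--     start = 0
--     end = seq_len
--
--     def color_region(location, color):
--         if location is not None:
--             cstart, cend = location
--             if cstart < 0 or cend < 0:
--                 return
--
--             for i in range(cstart, cend + 1):  # Include the end position
--                 if i < seq_len:
--                     if quality_scores[i] < 10:
--                         colored_seq[i] = color + seq[i].lower() + color_reset
--                     else:
--                         colored_seq[i] = color + seq[i] + color_reset
--
--     # Color barcode1 (blue)
--     color_region(b1_location, blue)
--
--     # Color primer1 (green)
--     color_region(p1_location, green)
--
--     # Color primer2 (green)
--     color_region(p2_location, green)
--
--     # Color barcode2 (blue)
--     color_region(b2_location, blue)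
--
--     # Fill in uncolored regions
--     for i in range(seq_len):
--         if colored_seq[i] == '':
--             if quality_scores[i] < 10:
--                 colored_seq[i] = seq[i].lower()
--             else:
--                 colored_seq[i] = seq[i]
--
--     return ''.join(colored_seq[start:end])
-- ===== SOURCE B (Python) =====
-- def color_sequence(seq, quality_scores, p1_location, p2_location, b1_location, b2_location):
--     blue = "\033[0;34m"
--     green = "\033[0;32m"
--     color_reset = "\033[0m"
--     # regions in reverse application priority: a later region in A overwrites earlier ones
--     regions = ((b2_location, blue), (p2_location, green),
--                (p1_location, green), (b1_location, blue))
--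
--     def color_at(i):
--         for loc, color in regions:
--             if loc is not None:
--                 cstart, cend = loc
--                 if cstart >= 0 and cend >= 0 and cstart <= i <= cend:
--                     return color
--         return None
--
--     out = []
--     for i in range(len(seq)):
--         ch = seq[i].lower() if quality_scores[i] < 10 else seq[i]
--         c = color_at(i)
--         out.append(c + ch + color_reset if c is not None else ch)
--     return ''.join(out)
-- ===== Notes on version B (the rewrite author's own statement) =====
-- stated objective: simpler
-- what changed: Instead of A's mutable colored-cell array written by four region passes plus a fill pass, B makes one pass over the indices and computes each character's color directly by first-match lookup over the regions in reverse application priority (b2, p2, p1, b1).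
import Mathlib
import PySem

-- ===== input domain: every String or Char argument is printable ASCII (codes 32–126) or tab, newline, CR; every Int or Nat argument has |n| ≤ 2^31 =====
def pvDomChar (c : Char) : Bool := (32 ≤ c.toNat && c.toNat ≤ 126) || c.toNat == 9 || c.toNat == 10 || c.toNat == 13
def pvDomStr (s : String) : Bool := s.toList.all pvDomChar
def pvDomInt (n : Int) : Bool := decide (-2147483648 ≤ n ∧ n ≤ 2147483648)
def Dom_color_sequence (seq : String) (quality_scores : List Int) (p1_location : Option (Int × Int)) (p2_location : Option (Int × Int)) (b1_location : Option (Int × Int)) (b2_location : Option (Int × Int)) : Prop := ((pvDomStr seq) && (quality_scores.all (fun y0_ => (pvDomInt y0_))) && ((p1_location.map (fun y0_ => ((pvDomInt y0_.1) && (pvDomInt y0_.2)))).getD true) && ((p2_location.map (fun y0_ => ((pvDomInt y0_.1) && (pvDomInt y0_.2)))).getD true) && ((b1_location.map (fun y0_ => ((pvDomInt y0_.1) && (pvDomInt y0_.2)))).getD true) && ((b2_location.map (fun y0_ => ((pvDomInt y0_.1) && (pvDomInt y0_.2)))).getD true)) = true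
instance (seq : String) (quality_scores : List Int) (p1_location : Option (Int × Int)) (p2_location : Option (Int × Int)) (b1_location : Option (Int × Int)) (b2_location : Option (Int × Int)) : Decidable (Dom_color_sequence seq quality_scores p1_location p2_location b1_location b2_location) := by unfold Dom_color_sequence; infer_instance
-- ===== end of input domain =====

-- ===== PORT A =====
-- B changes the decomposition: A fills a mutable cell array by four region passes plus a
-- fill pass; B computes each character's color in one pass by first-match region lookup.
-- quality_scores[i] is ported with pyGetD (exact under Pre_, which excludes the IndexError inputs).
def pvA_colorRegion (seqL : List Char) (qs : List Int) (seqLen : Nat) (colorReset : String)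
    (loc : Option (Int × Int)) (color : String) (colored : List String) : List String :=
  match loc with
  | none => colored
  | some (cstart, cend) =>
    if cstart < 0 ∨ cend < 0 then colored
    else
      (PySem.List.pyRange cstart (cend + 1) 1).foldl (fun cs i =>
        if i < (seqLen : Int) then
          if PySem.List.pyGetD qs i 0 < 10 then
            cs.set i.toNat (color ++ String.ofList [PySem.Chars.lowerChar (seqL.getD i.toNat ' ')] ++ colorReset)
          else
            cs.set i.toNat (color ++ String.ofList [seqL.getD i.toNat ' '] ++ colorReset)
        else cs) colored

def color_sequence (seq : String) (quality_scores : List Int) (p1_location : Option (Int × Int)) (p2_location : Option (Int × Int)) (b1_location : Option (Int × Int)) (b2_location : Option (Int × Int)) : String :=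
  let blue := "\x1b[0;34m"
  let green := "\x1b[0;32m"
  let color_reset := "\x1b[0m"
  let seqL := seq.toList
  let seq_len := seqL.length
  let colored0 := List.replicate seq_len ""
  let start : Int := 0
  let endI : Int := (seq_len : Int)
  let c1 := pvA_colorRegion seqL quality_scores seq_len color_reset b1_location blue colored0
  let c2 := pvA_colorRegion seqL quality_scores seq_len color_reset p1_location green c1
  let c3 := pvA_colorRegion seqL quality_scores seq_len color_reset p2_location green c2
  let c4 := pvA_colorRegion seqL quality_scores seq_len color_reset b2_location blue c3
  let filled := (PySem.List.pyRange 0 (seq_len : Int) 1).foldl (fun cs i =>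
    if cs.getD i.toNat "" = "" then
      if PySem.List.pyGetD quality_scores i 0 < 10 then
        cs.set i.toNat (String.ofList [PySem.Chars.lowerChar (seqL.getD i.toNat ' ')])
      else
        cs.set i.toNat (String.ofList [seqL.getD i.toNat ' '])
    else cs) c4
  PySem.Str.join "" (PySem.List.slice filled (some start) (some endI))

-- ===== PORT B =====
-- first-match colour lookup, regions given in reverse application priority
def pvB_colorAt : List (Option (Int × Int) × String) → Int → Option String
  | [], _ => none
  | (loc, color) :: rest, i =>
    match loc with
    | some (cstart, cend) =>
        if 0 ≤ cstart ∧ 0 ≤ cend ∧ cstart ≤ i ∧ i ≤ cend then some color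
        else pvB_colorAt rest i
    | none => pvB_colorAt rest i

def color_sequence_alt (seq : String) (quality_scores : List Int) (p1_location : Option (Int × Int)) (p2_location : Option (Int × Int)) (b1_location : Option (Int × Int)) (b2_location : Option (Int × Int)) : String :=
  let blue := "\x1b[0;34m"
  let green := "\x1b[0;32m"
  let color_reset := "\x1b[0m"
  let seqL := seq.toList
  let regions := [(b2_location, blue), (p2_location, green), (p1_location, green), (b1_location, blue)]
  PySem.Str.join "" ((List.range seqL.length).map (fun (i : Nat) =>
    let ch := if PySem.List.pyGetD quality_scores (i : Int) 0 < 10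
              then String.ofList [PySem.Chars.lowerChar (seqL.getD i ' ')]
              else String.ofList [seqL.getD i ' ']
    match pvB_colorAt regions (i : Int) with
    | some c => c ++ ch ++ color_reset
    | none => ch))

-- ===== PRECONDITION & SPEC =====
-- Pre_ excludes exactly the inputs on which A raises IndexError: whenever seq is nonempty,
-- A reads quality_scores[i] for every i < len(seq).
def Pre_color_sequence (seq : String) (quality_scores : List Int) (p1_location : Option (Int × Int)) (p2_location : Option (Int × Int)) (b1_location : Option (Int × Int)) (b2_location : Option (Int × Int)) : Prop :=
  seq.toList.length ≤ quality_scores.length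
instance (seq : String) (quality_scores : List Int) (p1_location : Option (Int × Int)) (p2_location : Option (Int × Int)) (b1_location : Option (Int × Int)) (b2_location : Option (Int × Int)) : Decidable (Pre_color_sequence seq quality_scores p1_location p2_location b1_location b2_location) := by unfold Pre_color_sequence; infer_instance

def pvWitness_color_sequence : String × List Int × (Option (Int × Int)) × (Option (Int × Int)) × (Option (Int × Int)) × (Option (Int × Int)) :=
  ("ACGT", [5, 12, 9, 30], some (0, 1), some (3, 3), some (1, 2), none)

def Spec_color_sequence (seq : String) (quality_scores : List Int) (p1_location : Option (Int × Int)) (p2_location : Option (Int × Int)) (b1_location : Option (Int × Int)) (b2_location : Option (Int × Int)) (out : String) : Prop := out = color_sequence_alt seq quality_scores p1_location p2_location b1_location b2_location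
instance (seq : String) (quality_scores : List Int) (p1_location : Option (Int × Int)) (p2_location : Option (Int × Int)) (b1_location : Option (Int × Int)) (b2_location : Option (Int × Int)) (out : String) : Decidable (Spec_color_sequence seq quality_scores p1_location p2_location b1_location b2_location out) := by unfold Spec_color_sequence; infer_instance

-- ===== CLAIM (what is proved, stated in full; the proofs are below) =====
def Claim_equal_color_sequence : Prop := ∀ (seq : String) (quality_scores : List Int) (p1_location : Option (Int × Int)) (p2_location : Option (Int × Int)) (b1_location : Option (Int × Int)) (b2_location : Option (Int × Int)), Dom_color_sequence seq quality_scores p1_location p2_location b1_location b2_location → Pre_color_sequence seq quality_scores p1_location p2_location b1_location b2_location → Spec_color_sequence seq quality_scores p1_location p2_location b1_location b2_location (color_sequence seq quality_scores p1_location p2_location b1_location b2_location)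

-- ===== LEMMAS AND PROOFS =====

-- the displayed (possibly lower-cased) character at position i, shared shape of both ports
def pvDisp (seqL : List Char) (qs : List Int) (i : Int) : String :=
  if PySem.List.pyGetD qs i 0 < 10
  then String.ofList [PySem.Chars.lowerChar (seqL.getD i.toNat ' ')]
  else String.ofList [seqL.getD i.toNat ' ']

theorem pvDisp_ne_empty (seqL : List Char) (qs : List Int) (i : Int) : pvDisp seqL qs i ≠ "" := by
  unfold pvDisp; split <;> simp

-- does location loc colour position j?
def pvCoversB (loc : Option (Int × Int)) (j : Int) : Bool :=
  match loc with
  | none => false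
  | some (s, e) => decide (0 ≤ s ∧ 0 ≤ e ∧ s ≤ j ∧ j ≤ e)

-- a fold that only writes cell i at iteration i (guarded by i < n) keeps the length
theorem pv_foldl_guard_set_length (n : Nat) (f : Int → String) (l : List Int) :
    ∀ cs : List String,
      (l.foldl (fun cs i => if i < (n : Int) then cs.set i.toNat (f i) else cs) cs).length
        = cs.length := by
  induction l with
  | nil => intro cs; rfl
  | cons i l ih =>
    intro cs
    simp only [List.foldl_cons]
    rw [ih]
    split <;> simp

-- final content of cell j after a guarded write-only fold: the written value if j was
-- visited and in range, the original cell otherwise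
theorem pv_foldl_guard_set_getElem? (n : Nat) (f : Int → String) (l : List Int) :
    ∀ (cs : List String) (j : Nat), (∀ i ∈ l, 0 ≤ i) → cs.length = n →
      (l.foldl (fun cs i => if i < (n : Int) then cs.set i.toNat (f i) else cs) cs)[j]?
        = if (j : Int) ∈ l ∧ j < n then some (f (j : Int)) else cs[j]? := by
  induction l with
  | nil => intro cs j _ _; simp
  | cons i l ih =>
    intro cs j hpos hlen
    have hi : 0 ≤ i := hpos i List.mem_cons_self
    simp only [List.foldl_cons]
    have hlen' : (if i < (n : Int) then cs.set i.toNat (f i) else cs).length = n := by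
      split <;> simp [hlen]
    rw [ih _ j (fun x hx => hpos x (List.mem_cons_of_mem _ hx)) hlen']
    by_cases hmem : (j : Int) ∈ l ∧ j < n
    · simp [hmem, List.mem_cons]
    · simp only [if_neg hmem]
      by_cases hji : (j : Int) = i
      · have hij : i.toNat = j := by omega
        by_cases hj : j < n
        · have hin : i < (n : Int) := by omega
          rw [if_pos hin, hij, List.getElem?_set_self (by omega)]
          rw [if_pos ⟨List.mem_cons.2 (Or.inl hji), hj⟩, hji]
        · have hin : ¬ i < (n : Int) := by omega
          rw [if_neg hin, if_neg (by tauto)]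
      · have hne : i.toNat ≠ j := by omega
        have hcs : (if i < (n : Int) then cs.set i.toNat (f i) else cs)[j]? = cs[j]? := by
          split
          · exact List.getElem?_set_ne hne
          · rfl
        rw [hcs]
        have hnotr : ¬ ((j : Int) ∈ i :: l ∧ j < n) := by
          rintro ⟨hm, hjn⟩
          rcases List.mem_cons.1 hm with h | h
          · exact hji h
          · exact hmem ⟨h, hjn⟩
        rw [if_neg hnotr]

-- final content after the fill pass: cells that were "" and were visited get f, others stay
theorem pv_foldl_fill_getElem? (f : Int → String) (hf : ∀ i, f i ≠ "") (l : List Int) :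
    ∀ (cs : List String) (j : Nat), (∀ i ∈ l, 0 ≤ i) →
      (l.foldl (fun cs i => if cs.getD i.toNat "" = "" then cs.set i.toNat (f i) else cs) cs)[j]?
        = if (j : Int) ∈ l ∧ cs[j]? = some "" then some (f (j : Int)) else cs[j]? := by
  induction l with
  | nil => intro cs j _; simp
  | cons i l ih =>
    intro cs j hpos
    have hi : 0 ≤ i := hpos i List.mem_cons_self
    simp only [List.foldl_cons]
    rw [ih _ j (fun x hx => hpos x (List.mem_cons_of_mem _ hx))]
    by_cases hji : (j : Int) = i
    · have hij : i.toNat = j := by omega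
      rw [hij]
      by_cases hjr : j < cs.length
      · have hget : cs.getD j "" = cs[j] := List.getD_eq_getElem cs "" hjr
        by_cases hv : cs[j] = ""
        · have hcond : cs.getD j "" = "" := by rw [hget, hv]
          rw [if_pos hcond]
          have h1 : (cs.set j (f i))[j]? = some (f i) := List.getElem?_set_self (by simpa using hjr)
          rw [h1]
          have h2 : ¬ ((j : Int) ∈ l ∧ some (f i) = some "") := by
            rintro ⟨-, h⟩; exact hf i (Option.some.inj h)
          rw [if_neg h2, if_pos ⟨List.mem_cons.2 (Or.inl hji), by rw [List.getElem?_eq_getElem hjr, hv]⟩, hji]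
        · have hcond : ¬ cs.getD j "" = "" := by rw [hget]; exact hv
          rw [if_neg hcond]
          have h2 : (cs[j]? = some "") = False := by
            simp only [List.getElem?_eq_getElem hjr, eq_iff_iff, iff_false]
            intro h; exact hv (Option.some.inj h)
          by_cases hmem : (j : Int) ∈ l ∧ cs[j]? = some ""
          · exact absurd hmem.2 (by simp [h2])
          · have hnotr : ¬ ((j : Int) ∈ i :: l ∧ cs[j]? = some "") := by
              rintro ⟨-, h⟩; simp [h2] at h
            rw [if_neg hmem, if_neg hnotr]
      · -- j out of range: the default-read is "" but the write is a no-op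
        have hnone : cs[j]? = none := List.getElem?_eq_none (by omega)
        have hset : cs.set j (f i) = cs := List.set_eq_of_length_le (by omega)
        have hcond : cs.getD j "" = "" := by
          simp [List.getD, hnone]
        rw [if_pos hcond, hset]
        rw [if_neg (by rw [hnone]; rintro ⟨-, h⟩; cases h),
            if_neg (by rw [hnone]; rintro ⟨-, h⟩; cases h)]
    · have hne : i.toNat ≠ j := by omega
      have hcs : (if cs.getD i.toNat "" = "" then cs.set i.toNat (f i) else cs)[j]? = cs[j]? := by
        split
        · exact List.getElem?_set_ne hne
        · rfl
      rw [hcs]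
      by_cases hmem : (j : Int) ∈ l ∧ cs[j]? = some ""
      · rw [if_pos hmem, if_pos ⟨List.mem_cons_of_mem _ hmem.1, hmem.2⟩]
      · have hnotr : ¬ ((j : Int) ∈ i :: l ∧ cs[j]? = some "") := by
          rintro ⟨hm, h⟩
          rcases List.mem_cons.1 hm with hh | hh
          · exact hji hh
          · exact hmem ⟨hh, h⟩
        rw [if_neg hmem, if_neg hnotr]

-- the fill fold also keeps the length
theorem pv_foldl_fill_length (f : Int → String) (l : List Int) :
    ∀ cs : List String,
      (l.foldl (fun cs i => if cs.getD i.toNat "" = "" then cs.set i.toNat (f i) else cs) cs).length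
        = cs.length := by
  induction l with
  | nil => intro cs; rfl
  | cons i l ih =>
    intro cs
    simp only [List.foldl_cons]
    rw [ih]
    split <;> simp

-- the body of A's region loop, rewritten with the common displayed-character function
theorem pvA_region_body_eq (seqL : List Char) (qs : List Int) (n : Nat) (reset color : String) :
    (fun (cs : List String) (i : Int) =>
      if i < (n : Int) then
        if PySem.List.pyGetD qs i 0 < 10 then
          cs.set i.toNat (color ++ String.ofList [PySem.Chars.lowerChar (seqL.getD i.toNat ' ')] ++ reset)
        else
          cs.set i.toNat (color ++ String.ofList [seqL.getD i.toNat ' '] ++ reset)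
      else cs)
    = fun cs i => if i < (n : Int) then cs.set i.toNat (color ++ pvDisp seqL qs i ++ reset) else cs := by
  funext cs i
  unfold pvDisp
  split_ifs <;> rfl

-- the body of A's fill loop, rewritten likewise
theorem pvA_fill_body_eq (seqL : List Char) (qs : List Int) :
    (fun (cs : List String) (i : Int) =>
      if cs.getD i.toNat "" = "" then
        if PySem.List.pyGetD qs i 0 < 10 then
          cs.set i.toNat (String.ofList [PySem.Chars.lowerChar (seqL.getD i.toNat ' ')])
        else
          cs.set i.toNat (String.ofList [seqL.getD i.toNat ' '])
      else cs)
    = fun cs i => if cs.getD i.toNat "" = "" then cs.set i.toNat (pvDisp seqL qs i) else cs := by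
  funext cs i
  unfold pvDisp
  split_ifs <;> rfl

theorem pvA_colorRegion_length (seqL : List Char) (qs : List Int) (n : Nat) (reset : String)
    (loc : Option (Int × Int)) (color : String) (cs : List String) :
    (pvA_colorRegion seqL qs n reset loc color cs).length = cs.length := by
  rcases loc with _ | ⟨s, e⟩
  · rfl
  · simp only [pvA_colorRegion]
    split
    · rfl
    · rw [pvA_region_body_eq, pv_foldl_guard_set_length]

theorem pvA_colorRegion_getElem? (seqL : List Char) (qs : List Int) (n : Nat) (reset : String)
    (loc : Option (Int × Int)) (color : String) (cs : List String) (j : Nat)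
    (hlen : cs.length = n) :
    (pvA_colorRegion seqL qs n reset loc color cs)[j]?
      = if pvCoversB loc (j : Int) ∧ j < n
        then some (color ++ pvDisp seqL qs (j : Int) ++ reset) else cs[j]? := by
  rcases loc with _ | ⟨s, e⟩
  · simp [pvA_colorRegion, pvCoversB]
  · simp only [pvA_colorRegion]
    split
    · rename_i hneg
      rw [if_neg (by
        simp only [pvCoversB, decide_eq_true_eq]
        rintro ⟨⟨h1, h2, -, -⟩, -⟩
        rcases hneg with h | h <;> omega)]
    · rename_i hneg
      have hs : 0 ≤ s := not_lt.1 (fun h => hneg (Or.inl h))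
      have he : 0 ≤ e := not_lt.1 (fun h => hneg (Or.inr h))
      rw [pvA_region_body_eq,
          pv_foldl_guard_set_getElem? n _ _ cs j
            (fun i hi => le_trans hs ((PySem.List.mem_pyRange_one.mp hi).1)) hlen]
      have hmem : ((j : Int) ∈ PySem.List.pyRange s (e + 1) 1) ↔ (s ≤ (j : Int) ∧ (j : Int) ≤ e) := by
        rw [PySem.List.mem_pyRange_one]; omega
      simp only [pvCoversB, decide_eq_true_eq, hmem]
      split_ifs with h1 h2 <;> first | rfl | (exfalso; tauto)

-- colours ending in the reset literal are never the empty cell marker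
theorem pvColored_ne_empty (c d : String) : c ++ d ++ "\x1b[0m" ≠ "" := by
  intro h
  have := congrArg String.toList h
  simp at this

-- B's first-match lookup, spelled out on the four-region list
theorem pvB_colorAt_eq (p1 p2 b1 b2 : Option (Int × Int)) (blue green : String) (i : Int) :
    pvB_colorAt [(b2, blue), (p2, green), (p1, green), (b1, blue)] i
      = if pvCoversB b2 i then some blue
        else if pvCoversB p2 i then some green
        else if pvCoversB p1 i then some green
        else if pvCoversB b1 i then some blue
        else none := by
  rcases b2 with _ | ⟨s2, e2⟩ <;> rcases p2 with _ | ⟨sq, eq'⟩ <;>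
    rcases p1 with _ | ⟨sp, ep⟩ <;> rcases b1 with _ | ⟨s1, e1⟩ <;>
    simp [pvB_colorAt, pvCoversB]

-- ===== VERDICT (by name: the statement is the Claim_ definition above) =====
set_option maxHeartbeats 1000000 in
theorem color_sequence_spec : Claim_equal_color_sequence := by
  intro seq qs p1 p2 b1 b2 _ hpre
  unfold Spec_color_sequence color_sequence color_sequence_alt
  simp only []
  set seqL := seq.toList with hseqL
  set n := seqL.length with hn
  -- the four region stages
  set c0 := List.replicate n ("" : String) with hc0
  set c1 := pvA_colorRegion seqL qs n "\x1b[0m" b1 "\x1b[0;34m" c0 with hc1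
  set c2 := pvA_colorRegion seqL qs n "\x1b[0m" p1 "\x1b[0;32m" c1 with hc2
  set c3 := pvA_colorRegion seqL qs n "\x1b[0m" p2 "\x1b[0;32m" c2 with hc3
  set c4 := pvA_colorRegion seqL qs n "\x1b[0m" b2 "\x1b[0;34m" c3 with hc4
  have hl0 : c0.length = n := by simp [hc0]
  have hl1 : c1.length = n := by rw [hc1, pvA_colorRegion_length]; exact hl0
  have hl2 : c2.length = n := by rw [hc2, pvA_colorRegion_length]; exact hl1
  have hl3 : c3.length = n := by rw [hc3, pvA_colorRegion_length]; exact hl2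
  have hl4 : c4.length = n := by rw [hc4, pvA_colorRegion_length]; exact hl3
  rw [pvA_fill_body_eq seqL qs]
  set filled := (PySem.List.pyRange 0 (n : Int) 1).foldl
      (fun cs i => if cs.getD i.toNat "" = "" then cs.set i.toNat (pvDisp seqL qs i) else cs) c4
      with hfilled
  have hlf : filled.length = n := by rw [hfilled, pv_foldl_fill_length]; exact hl4
  -- the slice [0:n] is the whole list
  have hslice : PySem.List.slice filled (some (0 : Int)) (some ((n : Int))) = filled := by
    rw [PySem.List.slice_zero_start, PySem.List.slice_to_natCast, ← hlf, List.take_length]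
  rw [hslice]
  congr 1
  -- pointwise equality of the two character lists
  apply List.ext_getElem?
  intro j
  have hget : filled[j]?
      = if ((j : Int) ∈ PySem.List.pyRange 0 (n : Int) 1) ∧ c4[j]? = some "" then
          some (pvDisp seqL qs (j : Int)) else c4[j]? := by
    rw [hfilled]
    exact pv_foldl_fill_getElem? _ (pvDisp_ne_empty seqL qs) _ c4 j
      (fun i hi => (PySem.List.mem_pyRange_one.mp hi).1)
  have h4 := pvA_colorRegion_getElem? seqL qs n "\x1b[0m" b2 "\x1b[0;34m" c3 j hl3
  have h3 := pvA_colorRegion_getElem? seqL qs n "\x1b[0m" p2 "\x1b[0;32m" c2 j hl2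
  have h2 := pvA_colorRegion_getElem? seqL qs n "\x1b[0m" p1 "\x1b[0;32m" c1 j hl1
  have h1 := pvA_colorRegion_getElem? seqL qs n "\x1b[0m" b1 "\x1b[0;34m" c0 j hl0
  rw [← hc4] at h4; rw [← hc3] at h3; rw [← hc2] at h2; rw [← hc1] at h1
  by_cases hj : j < n
  · have hjmem : (j : Int) ∈ PySem.List.pyRange 0 (n : Int) 1 := by
      rw [PySem.List.mem_pyRange_one]; omega
    have hc0j : c0[j]? = some "" := by
      rw [hc0]; simp [hj]
    rw [hget, h4, h3, h2, h1, hc0j]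
    clear hget h4 h3 h2 h1 hc0j hslice hlf hl0 hl1 hl2 hl3 hl4 hpre
    clear_value c0 c1 c2 c3 c4 filled
    clear hfilled hc0 hc1 hc2 hc3 hc4 c0 c1 c2 c3 c4 filled
    rw [List.getElem?_map, show (List.range n)[j]? = some j from by simp [hj],
        Option.map_some, pvB_colorAt_eq]
    simp only [hjmem, true_and, hj, and_true, pvDisp, Int.toNat_natCast]
    split_ifs <;>
      first
        | (exact absurd (Option.some.inj (by assumption)) (pvColored_ne_empty _ _))
        | (exact absurd rfl (by assumption))
        | rfl
  · -- beyond the sequence both sides are none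
    have hjmem : ¬ (j : Int) ∈ PySem.List.pyRange 0 (n : Int) 1 := by
      rw [PySem.List.mem_pyRange_one]; omega
    rw [hget, if_neg (by tauto), h4, if_neg (by tauto), h3, if_neg (by tauto),
        h2, if_neg (by tauto), h1, if_neg (by tauto)]
    rw [hc0]
    simp [hj]
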